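-- pv_equiv track=rewrite | github.com/Manavvv13/DSA | CountLargePalindrome.py | compute
-- ===== SOURCE A (Python) =====
-- def compute(num):
--     count = 0
--     largestDigit = 0
--     temp = num
--     rev = 0
--
--     while num > 0:
--         lastDigit = num % 10
--         if lastDigit > largestDigit:
--             largestDigit = lastDigit
--         rev = rev * 10 + lastDigit
--         num = num // 10
--         count += 1
--     isPalindrome = temp == rev
--     return count, largestDigit, isPalindrome
-- ===== SOURCE B (Python) =====
-- def compute(num):
--     if num <= 0:
--         # the digit loop never runs: 0 digits, no largest digit, palindrome iff num == 0
--         return 0, 0, num == 0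
--     s = str(num)
--     return len(s), max(int(c) for c in s), s == s[::-1]
-- ===== Notes on version B (the rewrite author's own statement) =====
-- stated objective: idiomatic
-- what changed: B replaces the modulo/divide digit loop and reversed-number accumulator with the decimal string representation: len(s) for the digit count, max over the string's digits for the largest digit, and s == s[::-1] for the palindrome test.
import Mathlib
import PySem

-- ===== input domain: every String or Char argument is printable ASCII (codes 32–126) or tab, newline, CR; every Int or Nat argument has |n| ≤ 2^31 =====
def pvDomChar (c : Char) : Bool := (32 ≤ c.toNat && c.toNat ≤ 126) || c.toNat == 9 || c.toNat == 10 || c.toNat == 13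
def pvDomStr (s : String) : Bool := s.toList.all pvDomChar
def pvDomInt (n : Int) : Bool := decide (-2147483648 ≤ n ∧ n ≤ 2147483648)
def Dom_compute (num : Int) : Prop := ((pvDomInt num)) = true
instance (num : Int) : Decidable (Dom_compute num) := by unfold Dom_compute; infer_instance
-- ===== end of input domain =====

-- B replaces A's modulo/divide digit loop (with its reversed-number accumulator) by the
-- decimal string form: len(s), max digit of s, and s == s[::-1]; objective: idiomatic.

-- ===== PORT A =====

-- termination helper for the while-loop recursion (cited by name in decreasing_by)
theorem pvLoopDec (num : Int) (h : 0 < num) :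
    (PySem.Int.floordiv num 10).toNat < num.toNat := by
  have h10 : PySem.Int.floordiv num 10 = num / 10 := by
    simp [PySem.Int.floordiv, Int.fdiv_eq_ediv]
  have hn : num = ((num.toNat : Int)) := (Int.toNat_of_nonneg h.le).symm
  rw [h10, hn]
  have : ((num.toNat : Int)) / (10 : Int) = ((num.toNat / 10 : Nat) : Int) := by
    rw [Int.natCast_div]; norm_num
  rw [this, Int.toNat_natCast]
  exact Nat.div_lt_self (by omega) (by norm_num)

-- the while-loop of A, state = (num, count, largestDigit, rev)
def computeLoop (num count largestDigit rev : Int) : Int × Int × Int :=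
  if h : num > 0 then
    let lastDigit := PySem.Int.mod num 10
    let largestDigit' := if lastDigit > largestDigit then lastDigit else largestDigit
    computeLoop (PySem.Int.floordiv num 10) (count + 1) largestDigit' (rev * 10 + lastDigit)
  else (count, largestDigit, rev)
termination_by num.toNat
decreasing_by exact pvLoopDec num h

def compute (num : Int) : Int × Int × Bool :=
  let temp := num
  let (count, largestDigit, rev) := computeLoop num 0 0 0
  (count, largestDigit, decide (temp = rev))

-- ===== PORT B =====

def compute_alt (num : Int) : Int × Int × Bool :=
  if num ≤ 0 then (0, 0, decide (num = 0))
  else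
    let s := PySem.Int.toStr num
    -- int(c): each c is a digit char, so int() never fails; getD only makes the port total
    let digitsInt := s.toList.map (fun c => (PySem.Int.ofStr? (String.ofList [c])).getD 0)
    -- max(...): s is nonempty, so max never fails; getD only makes the port total
    let largest := (PySem.List.max? digitsInt (fun x => x)).getD 0
    -- s[::-1]: step -1 ≠ 0, so slice? always returns some; getD only makes the port total
    let r := (PySem.Str.slice? s none none (-1)).getD ""
    (PySem.Str.len s, largest, decide (s = r))

-- ===== PRECONDITION & SPEC =====
def Spec_compute (num : Int) (out : Int × Int × Bool) : Prop := out = compute_alt num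
instance (num : Int) (out : Int × Int × Bool) : Decidable (Spec_compute num out) := by unfold Spec_compute; infer_instance

-- ===== CLAIM (what is proved, stated in full; the proofs are below) =====
def Claim_equal_compute : Prop := ∀ (num : Int), Dom_compute num → Spec_compute num (compute num)

-- ===== LEMMAS AND PROOFS =====

theorem pv_fdiv (a : Nat) : PySem.Int.floordiv (a : Int) 10 = ((a / 10 : Nat) : Int) := by
  simp [PySem.Int.floordiv, Int.fdiv_eq_ediv, Int.natCast_div]

theorem pv_fmod (a : Nat) : PySem.Int.mod (a : Int) 10 = ((a % 10 : Nat) : Int) := by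
  simp [PySem.Int.mod, Int.fmod_eq_emod, Int.natCast_mod]

-- the loop computes: digit count, running max, and the base-10 reversal accumulator
theorem loop_eq (n : Nat) : ∀ (c l r : Int),
    computeLoop (n : Int) c l r =
      (c + (Nat.digits 10 n).length,
       (Nat.digits 10 n).foldl (fun (a : Int) (d : Nat) => if (d : Int) > a then (d : Int) else a) l,
       (Nat.digits 10 n).foldl (fun (r : Int) (d : Nat) => r * 10 + (d : Int)) r) := by
  induction n using Nat.strong_induction_on with
  | _ n ih =>
    intro c l r
    by_cases hn : n = 0
    · subst hn
      rw [computeLoop]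
      simp
    · rw [computeLoop]
      have hpos : (0 : Int) < (n : Int) := by exact_mod_cast Nat.pos_of_ne_zero hn
      rw [dif_pos hpos]
      simp only [pv_fdiv, pv_fmod]
      rw [ih (n / 10) (Nat.div_lt_self (Nat.pos_of_ne_zero hn) (by norm_num))]
      rw [Nat.digits_def' (by norm_num : 1 < 10) (Nat.pos_of_ne_zero hn)]
      simp only [List.foldl_cons, List.length_cons]
      refine Prod.ext ?_ rfl
      push_cast; ring

-- the reversal accumulator is ofDigits of the reversed digit list
theorem revfold_eq (L : List Nat) : ∀ (m : Int),
    L.foldl (fun (r : Int) (d : Nat) => r * 10 + (d : Int)) m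
      = m * 10 ^ L.length + ((Nat.ofDigits 10 L.reverse : Nat) : Int) := by
  induction L with
  | nil => intro m; simp
  | cons d t ih =>
    intro m
    simp only [List.foldl_cons, List.length_cons, List.reverse_cons]
    rw [ih]
    rw [Nat.ofDigits_append]
    push_cast [Nat.ofDigits_cons, Nat.ofDigits_nil]
    simp only [List.length_reverse]
    ring

-- running max: value characterisation
theorem maxfold_spec (L : List Int) : ∀ (init : Int),
    (L.foldl (fun a d => if d > a then d else a) init = init
       ∨ L.foldl (fun a d => if d > a then d else a) init ∈ L)
    ∧ init ≤ L.foldl (fun a d => if d > a then d else a) init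
    ∧ ∀ v ∈ L, v ≤ L.foldl (fun a d => if d > a then d else a) init := by
  induction L with
  | nil => intro init; simp
  | cons d t ih =>
    intro init
    simp only [List.foldl_cons, List.mem_cons]
    obtain ⟨h1, h2, h3⟩ := ih (if d > init then d else init)
    constructor
    · rcases h1 with h | h
      · rw [h]; split_ifs with hd
        · exact Or.inr (Or.inl rfl)
        · exact Or.inl rfl
      · exact Or.inr (Or.inr h)
    · refine ⟨?_, ?_⟩
      · refine le_trans ?_ h2; split_ifs <;> omega
      · intro v hv
        rcases hv with rfl | hv
        · refine le_trans ?_ h2; split_ifs <;> omega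
        · exact h3 v hv

theorem digitChar_inj (a b : Nat) (ha : a < 10) (hb : b < 10)
    (h : Nat.digitChar a = Nat.digitChar b) : a = b := by
  interval_cases a <;> interval_cases b <;> first | rfl | exact absurd h (by decide)

theorem map_digitChar_inj : ∀ (L1 L2 : List Nat), (∀ d ∈ L1, d < 10) → (∀ d ∈ L2, d < 10) →
    L1.map Nat.digitChar = L2.map Nat.digitChar → L1 = L2 := by
  intro L1
  induction L1 with
  | nil => intro L2 _ _ h; cases L2 with | nil => rfl | cons b u => simp at h
  | cons a t ih =>
    intro L2 h1 h2 h
    cases L2 with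
    | nil => simp_all
    | cons b u =>
      simp only [List.map_cons, List.cons.injEq] at h
      have hab := digitChar_inj a b (h1 a (by simp)) (h2 b (by simp)) h.1
      have := ih u (fun d hd => h1 d (by simp [hd])) (fun d hd => h2 d (by simp [hd])) h.2
      simp [hab, this]

theorem ofDigits_inj : ∀ (L1 L2 : List Nat), L1.length = L2.length →
    (∀ d ∈ L1, d < 10) → (∀ d ∈ L2, d < 10) →
    Nat.ofDigits 10 L1 = Nat.ofDigits 10 L2 → L1 = L2 := by
  intro L1
  induction L1 with
  | nil => intro L2 hlen _ _ _; cases L2 with | nil => rfl | cons b u => simp at hlen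
  | cons a t ih =>
    intro L2 hlen h1 h2 h
    cases L2 with
    | nil => simp_all
    | cons b u =>
      simp only [Nat.ofDigits_cons] at h
      have ha := h1 a (by simp)
      have hb := h2 b (by simp)
      have hab : a = b ∧ Nat.ofDigits 10 t = Nat.ofDigits 10 u := by
        constructor <;> omega
      have := ih u (by simpa using hlen) (fun d hd => h1 d (by simp [hd]))
        (fun d hd => h2 d (by simp [hd])) hab.2
      simp [hab.1, this]

theorem toDigitsCore_eq : ∀ (fuel : Nat), ∀ (n : Nat) (ds : List Char), 0 < n → n < 10 ^ fuel →
    Nat.toDigitsCore 10 fuel n ds = ((Nat.digits 10 n).map Nat.digitChar).reverse ++ ds := by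
  intro fuel
  induction fuel with
  | zero => intro n ds h1 h2; omega
  | succ f ih =>
    intro n ds h1 h2
    rw [Nat.toDigitsCore]
    rw [Nat.digits_def' (by norm_num : 1 < 10) h1]
    by_cases hz : n / 10 = 0
    · rw [if_pos hz, hz]
      simp
    · rw [if_neg hz]
      rw [ih (n / 10) _ (Nat.pos_of_ne_zero hz)
        (by rw [Nat.div_lt_iff_lt_mul (by norm_num)]; calc n < 10 ^ (f + 1) := h2
              _ = 10 ^ f * 10 := by ring)]
      simp

theorem toDigits_eq (n : Nat) (h : 0 < n) :
    Nat.toDigits 10 n = ((Nat.digits 10 n).map Nat.digitChar).reverse := by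
  have hb : n < 10 ^ (n + 1) :=
    lt_of_lt_of_le (Nat.lt_pow_self (by norm_num)) (Nat.pow_le_pow_right (by norm_num) (Nat.le_succ n))
  simpa using toDigitsCore_eq (n + 1) n [] h hb

theorem ofChars?_digitChar (d : Nat) (h : d < 10) :
    PySem.Int.ofChars? [Nat.digitChar d] = some (d : Int) := by
  interval_cases d <;> decide

theorem pvFoldlMax (L : List Nat) (init : Int) :
    L.foldl (fun (a : Int) (d : Nat) => if (d : Int) > a then (d : Int) else a) init
      = (L.map (fun (d : Nat) => (d : Int))).foldl (fun a d => if d > a then d else a) init :=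
  by rw [List.foldl_map]

-- ===== VERDICT (by name: the statement is the Claim_ definition above) =====
theorem compute_spec : Claim_equal_compute := by
  intro num _
  unfold Spec_compute compute compute_alt
  by_cases hle : num ≤ 0
  · -- the loop never runs
    rw [computeLoop]
    rw [dif_neg (by omega)]
    simp [hle]
  · rw [if_neg hle]
    push_neg at hle
    obtain ⟨n, rfl⟩ : ∃ n : Nat, num = (n : Int) :=
      ⟨num.toNat, (Int.toNat_of_nonneg hle.le).symm⟩
    have hn0 : 0 < n := by exact_mod_cast hle
    set L := Nat.digits 10 n with hL
    have hLne : L ≠ [] := Nat.digits_ne_nil_iff_ne_zero.mpr (by omega)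
    have hLlt : ∀ d ∈ L, d < 10 := fun d hd => Nat.digits_lt_base (by norm_num) hd
    -- the string side
    have hs : (PySem.Int.toStr (n : Int)).toList = (L.map Nat.digitChar).reverse := by
      rw [PySem.Int.toList_toStr, PySem.Int.toChars]
      rw [if_neg (by omega), Int.toNat_natCast, toDigits_eq n hn0]
    rw [loop_eq n 0 0 0]
    simp only
    refine Prod.ext ?_ (Prod.ext ?_ ?_)
    · -- count = len(s)
      simp [PySem.Str.len, hs, hL]
    · -- largest digit
      simp only
      have hmap : (PySem.Int.toStr (n : Int)).toList.map
          (fun c => (PySem.Int.ofStr? (String.ofList [c])).getD 0)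
            = (L.map (fun (d : Nat) => (d : Int))).reverse := by
        rw [hs, List.map_reverse, List.map_map]
        congr 1
        refine List.map_congr_left ?_
        intro d hd
        simp [PySem.Int.ofStr?, ofChars?_digitChar d (hLlt d hd)]
      rw [hmap]
      -- B's max? value vs A's running max
      obtain ⟨m, hm⟩ : ∃ m, PySem.List.max? ((L.map (fun (d : Nat) => (d : Int))).reverse)
          (fun x => x) = some m := by
        cases hcase : PySem.List.max? ((L.map (fun (d : Nat) => (d : Int))).reverse) (fun x => x) with
        | none =>
            have h0 := (PySem.List.max?_eq_none_iff _ _).mp hcase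
            simp only [List.reverse_eq_nil_iff, List.map_eq_nil_iff] at h0
            exact absurd h0 hLne
        | some m => exact ⟨m, rfl⟩
      rw [hm]
      have hmem := PySem.List.max?_mem hm
      have hmax := PySem.List.max?_isMax hm
      simp only [List.mem_reverse] at hmem hmax
      rw [pvFoldlMax L 0]
      obtain ⟨h1, _, h3⟩ := maxfold_spec (L.map (fun (d : Nat) => (d : Int))) 0
      set f := (L.map (fun (d : Nat) => (d : Int))).foldl (fun a d => if d > a then d else a) 0 with hf
      have hfm : f ≤ m := by
        rcases h1 with h | h
        · rw [h]
          obtain ⟨d, hdL, hdm⟩ := List.mem_map.mp hmem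
          omega
        · exact hmax f h
      have hmf : m ≤ f := h3 m hmem
      simp only [Option.getD_some]
      omega
    · -- palindrome
      simp only
      have hrev : (PySem.Str.slice? (PySem.Int.toStr (n : Int)) none none (-1)).getD ""
          = String.ofList (PySem.Int.toStr (n : Int)).toList.reverse := by
        rw [PySem.Str.slice?_none_none_neg_one]; rfl
      rw [hrev]
      refine decide_eq_decide.mpr ?_
      rw [revfold_eq L 0]
      constructor
      · intro hEq
        -- n = ofDigits L.reverse  ⇒  L = L.reverse  ⇒  string palindrome
        have : (n : Int) = ((Nat.ofDigits 10 L.reverse : Nat) : Int) := by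
          linarith [hEq]
        have hNat : n = Nat.ofDigits 10 L.reverse := by exact_mod_cast this
        have hLrev : L = L.reverse := by
          refine ofDigits_inj L L.reverse (by simp) hLlt
            (fun d hd => hLlt d (List.mem_reverse.mp hd)) ?_
          rw [← hNat, hL, Nat.ofDigits_digits]
        apply String.toList_inj.mp
        rw [String.toList_ofList, hs, List.reverse_reverse, ← List.map_reverse, ← hLrev]
      · intro hEq
        -- string palindrome ⇒ L = L.reverse ⇒ the reversal accumulator is n
        have hChars := congrArg String.toList hEq
        rw [String.toList_ofList, hs, List.reverse_reverse, ← List.map_reverse] at hChars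
        have hLrev : L = L.reverse :=
          (map_digitChar_inj L.reverse L (fun d hd => hLlt d (List.mem_reverse.mp hd))
            hLlt hChars).symm
        have : Nat.ofDigits 10 L.reverse = n := by rw [← hLrev, hL, Nat.ofDigits_digits]
        rw [this]
        ring
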